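-- pv_equiv track=rewrite | github.com/sophiemiddleton/aitools | skills/coding-with-data-dispatcher/scripts/project_state_report.py | summarize_handles
-- ===== SOURCE A (Python) =====
-- from collections import Counter, defaultdict
-- from typing import Any
--
-- def summarize_handles(project: dict[str, Any]) -> tuple[Counter, dict[str, list[str]]]:
--     counts: Counter = Counter()
--     by_state: dict[str, list[str]] = defaultdict(list)
--
--     for h in project.get("file_handles", []) or []:
--         state = h.get("state", "unknown")
--         did = f"{h.get('namespace')}:{h.get('name')}"
--         counts[state] += 1
--         by_state[state].append(did)
--
--     return counts, dict(by_state)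
-- ===== SOURCE B (Python) =====
-- from collections import Counter
-- from typing import Any
--
-- def summarize_handles(project: dict[str, Any]) -> tuple[Counter, dict[str, list[str]]]:
--     # Flatten to (state, id) pairs once, then derive each result from the pair list:
--     # counts is Counter of the state sequence; by_state filters the pairs per distinct state.
--     pairs = [(h.get("state", "unknown"), f"{h.get('namespace')}:{h.get('name')}")
--              for h in (project.get("file_handles", []) or [])]
--     counts = Counter(st for st, _ in pairs)
--     states = dict.fromkeys(st for st, _ in pairs)
--     by_state = {s: [d for st, d in pairs if st == s] for s in states}
--     return counts, by_state
-- ===== Notes on version B (the rewrite author's own statement) =====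
-- stated objective: alternative
-- what changed: B replaces A's single loop that incrementally maintains a Counter and a defaultdict grouping by a staged pipeline: flatten handles to a (state, id) pair list, build the Counter from the state sequence in one call, and build by_state by filtering the pair list once per distinct state (O(n*k) filters instead of incremental dict accumulation).
import Mathlib
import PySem

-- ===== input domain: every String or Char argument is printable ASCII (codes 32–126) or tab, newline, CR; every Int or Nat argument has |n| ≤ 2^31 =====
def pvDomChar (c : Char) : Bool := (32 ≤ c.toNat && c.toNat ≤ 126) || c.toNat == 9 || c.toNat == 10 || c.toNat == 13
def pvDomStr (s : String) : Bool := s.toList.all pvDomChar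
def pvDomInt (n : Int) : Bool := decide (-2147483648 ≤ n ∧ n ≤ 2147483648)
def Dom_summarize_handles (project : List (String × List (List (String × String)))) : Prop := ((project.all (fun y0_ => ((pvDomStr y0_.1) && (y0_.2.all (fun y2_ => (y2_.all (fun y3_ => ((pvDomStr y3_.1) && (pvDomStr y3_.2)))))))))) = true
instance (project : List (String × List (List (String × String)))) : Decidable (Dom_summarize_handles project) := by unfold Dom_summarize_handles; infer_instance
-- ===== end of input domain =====

-- B replaces A's single two-aggregate loop by a staged pipeline (pair list, Counter of states, per-state filters); objective: alternative decomposition, same value.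


-- ===== PORT A =====
def summarize_handles (project : List (String × List (List (String × String)))) : (List (String × Int)) × (List (String × List String)) :=
  let handles := (PySem.Dict.mk project).getD "file_handles" []
  let res := handles.foldl
    (fun (acc : PySem.Dict String Int × PySem.Dict String (List String)) h =>
      let hd := PySem.Dict.mk h
      let state := hd.getD "state" "unknown"
      let did := hd.getD "namespace" "None" ++ ":" ++ hd.getD "name" "None"
      (acc.1.modify state 0 (· + 1), acc.2.modify state [] (· ++ [did])))
    (PySem.Dict.empty, PySem.Dict.empty)
  (res.1.items, res.2.items)

-- ===== PORT B =====
def summarize_handles_alt (project : List (String × List (List (String × String)))) : (List (String × Int)) × (List (String × List String)) :=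
  let handles := (PySem.Dict.mk project).getD "file_handles" []
  let pairs := handles.map (fun h =>
    let hd := PySem.Dict.mk h
    (hd.getD "state" "unknown", hd.getD "namespace" "None" ++ ":" ++ hd.getD "name" "None"))
  let counts := PySem.Dict.counter (pairs.map (fun p => p.1))      -- Counter(st for st, _ in pairs)
  let states := PySem.List.dedup (pairs.map (fun p => p.1))        -- dict.fromkeys(...)
  let by_state := states.map (fun s => (s, (pairs.filter (fun p => p.1 == s)).map (fun p => p.2)))
  (counts.items, by_state)

-- ===== PRECONDITION & SPEC =====
def Spec_summarize_handles (project : List (String × List (List (String × String)))) (out : (List (String × Int)) × (List (String × List String))) : Prop := out = summarize_handles_alt project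
instance (project : List (String × List (List (String × String)))) (out : (List (String × Int)) × (List (String × List String))) : Decidable (Spec_summarize_handles project out) := by unfold Spec_summarize_handles; infer_instance

-- ===== CLAIM =====
def Claim_equal_summarize_handles : Prop := ∀ (project : List (String × List (List (String × String)))), Dom_summarize_handles project → Spec_summarize_handles project (summarize_handles project)

-- ===== LEMMAS AND PROOFS =====

-- items of the grouping fold over a pair list = B's dedup-then-filter map
theorem pvGroup_items (pairs : List (String × String)) :
    (pairs.foldl (fun (d : PySem.Dict String (List String)) p => d.modify p.1 [] (· ++ [p.2])) PySem.Dict.empty).items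
    = (PySem.List.dedup (pairs.map (fun p => p.1))).map
        (fun s => (s, (pairs.filter (fun p => p.1 == s)).map (fun p => p.2))) := by
  have hnd : (pairs.foldl (fun (d : PySem.Dict String (List String)) p => d.modify p.1 [] (· ++ [p.2])) PySem.Dict.empty).keys.Nodup :=
    PySem.Dict.nodup_keys_foldl_modify_key pairs (fun p => p.1) ([] : List String)
      (fun _ p v => v ++ [p.2]) PySem.Dict.empty (by simp)
  rw [PySem.Dict.items_eq_map_keys _ hnd []]
  have hk : (pairs.foldl (fun (d : PySem.Dict String (List String)) p => d.modify p.1 [] (· ++ [p.2])) PySem.Dict.empty).keys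
      = PySem.Set.update (PySem.Dict.empty : PySem.Dict String (List String)).keys (pairs.map (fun p => p.1)) :=
    PySem.Dict.keys_foldl_modify_key pairs (fun p => p.1) ([] : List String)
      (fun _ p v => v ++ [p.2]) PySem.Dict.empty
  rw [hk]
  have hupd : PySem.Set.update (PySem.Dict.empty : PySem.Dict String (List String)).keys (pairs.map (fun p => p.1))
      = PySem.List.dedup (pairs.map (fun p => p.1)) := by
    simp [PySem.List.dedup_eq_ofList]
    rfl
  rw [hupd]
  apply List.map_congr_left
  intro s _
  rw [PySem.Dict.getD_foldl_modify_append]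
  simp

-- the whole pipeline equality, generic in how a handle yields its state and id
theorem pvMain {H : Type} (st did : H → String) (handles : List H) :
    (let res := handles.foldl
        (fun (acc : PySem.Dict String Int × PySem.Dict String (List String)) h =>
          (acc.1.modify (st h) 0 (· + 1), acc.2.modify (st h) [] (· ++ [did h])))
        (PySem.Dict.empty, PySem.Dict.empty)
     (res.1.items, res.2.items))
    = (let pairs := handles.map (fun h => (st h, did h))
       ((PySem.Dict.counter (pairs.map (fun p => p.1))).items,
        (PySem.List.dedup (pairs.map (fun p => p.1))).map
          (fun s => (s, (pairs.filter (fun p => p.1 == s)).map (fun p => p.2))))) := by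
  simp only []
  rw [PySem.List.foldl_prod_mk
    (f := fun (d : PySem.Dict String Int) h => d.modify (st h) 0 (· + 1))
    (g := fun (d : PySem.Dict String (List String)) h => d.modify (st h) [] (· ++ [did h]))]
  refine Prod.ext ?_ ?_
  · -- counts: the first fold is Counter of the state sequence
    show (handles.foldl (fun (d : PySem.Dict String Int) h => d.modify (st h) 0 (· + 1)) PySem.Dict.empty).items = _
    have : PySem.Dict.counter ((handles.map (fun h => (st h, did h))).map (fun p => p.1))
        = handles.foldl (fun (d : PySem.Dict String Int) h => d.modify (st h) 0 (· + 1)) PySem.Dict.empty := by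
      rw [PySem.Dict.counter_eq_foldl, List.foldl_map, List.foldl_map]
    rw [this]
  · -- grouping: fold over handles = fold over the pair list, then pvGroup_items
    show (handles.foldl (fun (d : PySem.Dict String (List String)) h => d.modify (st h) [] (· ++ [did h])) PySem.Dict.empty).items = _
    have : handles.foldl (fun (d : PySem.Dict String (List String)) h => d.modify (st h) [] (· ++ [did h])) PySem.Dict.empty
        = (handles.map (fun h => (st h, did h))).foldl
            (fun (d : PySem.Dict String (List String)) p => d.modify p.1 [] (· ++ [p.2])) PySem.Dict.empty := by
      rw [List.foldl_map]
    rw [this, pvGroup_items]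

-- ===== VERDICT =====
theorem summarize_handles_spec : Claim_equal_summarize_handles := by
  intro project _
  show summarize_handles project = summarize_handles_alt project
  exact pvMain
    (fun h => (PySem.Dict.mk h).getD "state" "unknown")
    (fun h => (PySem.Dict.mk h).getD "namespace" "None" ++ ":" ++ (PySem.Dict.mk h).getD "name" "None")
    ((PySem.Dict.mk project).getD "file_handles" [])
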